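-- pv_equiv track=rewrite | github.com/AutoShiftOps/sql-query-analyzer | backend/app/tools/query_parser.py | _extract_clause
-- ===== SOURCE A (Python) =====
-- from typing import Any, Dict, List, Optional, Tuple
--
-- def _strip_trailing_semicolon(s: str) -> str:
--     return (s or "").strip().rstrip(";").strip()
--
-- def _find_top_level_keyword_pos(sql: str, keyword: str, start_idx: int = 0) -> int:
--     """
--     Find the first top-level occurrence of `keyword` (case-insensitive),
--     where top-level means paren depth == 0 and not inside quotes.
--
--     keyword should be provided in lowercase, e.g. " from " or " order by ".
--     """
--     s = sql
--     sl = sql.lower()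
--     key = keyword.lower()
--
--     depth = 0
--     in_sq = False
--     in_dq = False
--
--     i = start_idx
--     while i < len(s):
--         ch = s[i]
--
--         if ch == "'" and not in_dq:
--             in_sq = not in_sq
--         elif ch == '"' and not in_sq:
--             in_dq = not in_dq
--         elif not in_sq and not in_dq:
--             if ch == "(":
--                 depth += 1
--             elif ch == ")":
--                 depth = max(0, depth - 1)
--             elif depth == 0:
--                 if sl.startswith(key, i):
--                     return i
--
--         i += 1
--
--     return -1
--
-- def _extract_clause(sql: str, start_kw: str, end_kws: List[str]) -> str:
--     """
--     Extract clause body appearing after start_kw up to the earliest of end_kws, all at top-level.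
--     Example: start_kw=" where ", end_kws=[" group by ", " order by ", " limit ", " fetch "]
--     """
--     sl = sql.lower()
--     start = _find_top_level_keyword_pos(sql, start_kw, 0)
--     if start == -1:
--         return ""
--
--     body_start = start + len(start_kw)
--     end_positions = []
--     for ek in end_kws:
--         p = _find_top_level_keyword_pos(sql, ek, body_start)
--         if p != -1:
--             end_positions.append(p)
--
--     body_end = min(end_positions) if end_positions else len(sql)
--     return _strip_trailing_semicolon(sql[body_start:body_end].strip())
-- ===== SOURCE B (Python) =====
-- from typing import List
--
-- def _strip_trailing_semicolon(s: str) -> str: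
--     return (s or "").strip().rstrip(";").strip()
--
-- def _top_level_spots(sql: str, start_idx: int) -> List[int]:
--     """One character sweep from start_idx with fresh state: the ordered list of
--     indices at paren depth 0, outside quotes, whose char is not a quote or paren."""
--     spots = []
--     depth = 0
--     in_sq = in_dq = False
--     i = start_idx
--     for ch in sql[start_idx:]:
--         if ch == "'" and not in_dq:
--             in_sq = not in_sq
--         elif ch == '"' and not in_sq:
--             in_dq = not in_dq
--         elif in_sq or in_dq:
--             pass
--         elif ch == "(":
--             depth += 1
--         elif ch == ")":
--             depth = max(0, depth - 1)
--         elif depth == 0: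
--             spots.append(i)
--         i += 1
--     return spots
--
-- def _extract_clause(sql: str, start_kw: str, end_kws: List[str]) -> str:
--     sl = sql.lower()
--     skw = start_kw.lower()
--     start = next((i for i in _top_level_spots(sql, 0) if sl.startswith(skw, i)), None)
--     if start is None:
--         return ""
--     body_start = start + len(start_kw)
--     ekws = [k.lower() for k in end_kws]
--     body_end = next((i for i in _top_level_spots(sql, body_start)
--                      if any(sl.startswith(k, i) for k in ekws)), len(sql))
--     return _strip_trailing_semicolon(sql[body_start:body_end].strip())
-- ===== Notes on version B (the rewrite author's own statement) =====
-- stated objective: alternative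
-- what changed: A interleaves the quote/paren state machine with keyword matching and early return, rescanning the string once per end keyword; B first materialises the ordered list of top-level positions in one stateful character sweep (per search region) and then finds the clause boundaries by plain first-match filtering over that list, matching all end keywords in one filter pass.
import Mathlib
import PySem

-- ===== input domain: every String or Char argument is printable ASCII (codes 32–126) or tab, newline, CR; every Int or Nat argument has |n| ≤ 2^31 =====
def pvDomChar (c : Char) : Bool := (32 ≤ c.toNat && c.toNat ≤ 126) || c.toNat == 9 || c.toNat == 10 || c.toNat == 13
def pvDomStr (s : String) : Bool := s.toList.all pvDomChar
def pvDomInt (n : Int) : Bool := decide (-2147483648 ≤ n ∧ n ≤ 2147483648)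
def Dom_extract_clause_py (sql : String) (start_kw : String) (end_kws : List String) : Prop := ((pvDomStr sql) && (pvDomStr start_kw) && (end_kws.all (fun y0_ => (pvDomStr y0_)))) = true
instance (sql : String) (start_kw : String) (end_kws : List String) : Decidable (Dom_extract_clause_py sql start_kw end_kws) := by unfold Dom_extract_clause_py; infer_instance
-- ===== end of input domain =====

-- B replaces A's fused scan-and-match loops (one full state-machine rescan per end keyword with
-- early return, then min of the found positions) by a staged decomposition: one state-machine
-- character sweep per search region that materialises the ordered list of top-level positions,
-- followed by plain first-match filtering over that list (all end keywords in one filter pass).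
-- Objective: alternative (same cost, different decomposition).

-- ===== PORT A =====
-- shared exact port of _strip_trailing_semicolon: strip, rstrip(';') (drop trailing ';'), strip
def pvStripSemi (s : List Char) : List Char :=
  PySem.Chars.strip (((PySem.Chars.strip s).reverse.dropWhile (fun c => c == ';')).reverse)

-- the `while i < len(s)` loop of _find_top_level_keyword_pos; structural recursion on the
-- fuel `s.length - i` (the loop runs exactly that many more iterations); none = Python's -1.
-- sl.startswith(key, i) is ported as key.isPrefixOf (sl.drop i), exact for 0 ≤ i < len(sl).
def pvFindAGo (s sl key : List Char) (fuel : Nat) (i : Nat) (depth : Int) (in_sq in_dq : Bool) : Option Nat :=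
  match fuel with
  | 0 => none
  | fuel + 1 =>
    match s[i]? with
    | none => none
    | some ch =>
      if ch == '\'' && !in_dq then pvFindAGo s sl key fuel (i+1) depth (!in_sq) in_dq
      else if ch == '"' && !in_sq then pvFindAGo s sl key fuel (i+1) depth in_sq (!in_dq)
      else if !in_sq && !in_dq then
        if ch == '(' then pvFindAGo s sl key fuel (i+1) (depth+1) in_sq in_dq
        else if ch == ')' then pvFindAGo s sl key fuel (i+1) (max 0 (depth-1)) in_sq in_dq
        else if depth == 0 && key.isPrefixOf (sl.drop i) then some i
        else pvFindAGo s sl key fuel (i+1) depth in_sq in_dq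
      else pvFindAGo s sl key fuel (i+1) depth in_sq in_dq

-- port of _find_top_level_keyword_pos (depth = 0, in_sq = in_dq = False, then the loop)
def pvFindA (s sl key : List Char) (i : Nat) : Option Nat :=
  pvFindAGo s sl key (s.length - i) i 0 false false

def extract_clause_py (sql : String) (start_kw : String) (end_kws : List String) : String :=
  let s := sql.toList
  let sl := PySem.Chars.lower s
  match pvFindA s sl (PySem.Chars.lower start_kw.toList) 0 with
  | none => ""
  | some start =>
    let body_start := start + start_kw.toList.length
    let end_positions := end_kws.foldl (fun acc ek =>
        match pvFindA s sl (PySem.Chars.lower ek.toList) body_start with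
        | some p => acc ++ [p]
        | none => acc) []
    let body_end : Nat := match PySem.List.min? end_positions (fun x => x) with
        | some m => m
        | none => s.length
    String.ofList (pvStripSemi (PySem.Chars.strip
      (PySem.List.slice s (some (Int.ofNat body_start)) (some (Int.ofNat body_end)))))

-- ===== PORT B =====
-- the body of _top_level_spots's `for ch in sql[start_idx:]` loop: one step of the quote/paren
-- state machine; state = (i, depth, in_sq, in_dq, spots), `i += 1` at the end of the body.
def pvSpotsStep (st : Nat × Int × Bool × Bool × List Nat) (ch : Char) : Nat × Int × Bool × Bool × List Nat :=
  let (i, depth, in_sq, in_dq, spots) := st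
  if ch == '\'' && !in_dq then (i+1, depth, !in_sq, in_dq, spots)
  else if ch == '"' && !in_sq then (i+1, depth, in_sq, !in_dq, spots)
  else if in_sq || in_dq then (i+1, depth, in_sq, in_dq, spots)
  else if ch == '(' then (i+1, depth+1, in_sq, in_dq, spots)
  else if ch == ')' then (i+1, max 0 (depth-1), in_sq, in_dq, spots)
  else if depth == 0 then (i+1, depth, in_sq, in_dq, spots ++ [i])
  else (i+1, depth, in_sq, in_dq, spots)

-- port of _top_level_spots: a fold of the step over the characters of sql[start_idx:]
def pvSpots (s : List Char) (start_idx : Nat) : List Nat :=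
  ((s.drop start_idx).foldl pvSpotsStep (start_idx, 0, false, false, [])).2.2.2.2

-- port of B's _extract_clause; next((... for i in spots if match), default) = (spots.find? match).getD default
def extract_clause_py_alt (sql : String) (start_kw : String) (end_kws : List String) : String :=
  let s := sql.toList
  let sl := PySem.Chars.lower s
  let skw := PySem.Chars.lower start_kw.toList
  match (pvSpots s 0).find? (fun i => skw.isPrefixOf (sl.drop i)) with
  | none => ""
  | some start =>
    let body_start := start + start_kw.toList.length
    let ekws := end_kws.map (fun k => PySem.Chars.lower k.toList)
    let body_end : Nat :=
      ((pvSpots s body_start).find? (fun i => ekws.any (fun k => k.isPrefixOf (sl.drop i)))).getD s.length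
    String.ofList (pvStripSemi (PySem.Chars.strip
      (PySem.List.slice s (some (Int.ofNat body_start)) (some (Int.ofNat body_end)))))

-- ===== PRECONDITION & SPEC =====
def Spec_extract_clause_py (sql : String) (start_kw : String) (end_kws : List String) (out : String) : Prop := out = extract_clause_py_alt sql start_kw end_kws
instance (sql : String) (start_kw : String) (end_kws : List String) (out : String) : Decidable (Spec_extract_clause_py sql start_kw end_kws out) := by unfold Spec_extract_clause_py; infer_instance

-- ===== CLAIM (what is proved, stated in full; the proofs are below) =====
def Claim_equal_extract_clause_py : Prop := ∀ (sql : String) (start_kw : String) (end_kws : List String), Dom_extract_clause_py sql start_kw end_kws → Spec_extract_clause_py sql start_kw end_kws (extract_clause_py sql start_kw end_kws)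

-- ===== LEMMAS AND PROOFS =====

/-- proof-side recursion computing the list of top-level spots, in the same fuel shape as A's loop -/
def spotsRec (s : List Char) (fuel : Nat) (i : Nat) (depth : Int) (in_sq in_dq : Bool) : List Nat :=
  match fuel with
  | 0 => []
  | fuel + 1 =>
    match s[i]? with
    | none => []
    | some ch =>
      if ch == '\'' && !in_dq then spotsRec s fuel (i+1) depth (!in_sq) in_dq
      else if ch == '"' && !in_sq then spotsRec s fuel (i+1) depth in_sq (!in_dq)
      else if in_sq || in_dq then spotsRec s fuel (i+1) depth in_sq in_dq
      else if ch == '(' then spotsRec s fuel (i+1) (depth+1) in_sq in_dq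
      else if ch == ')' then spotsRec s fuel (i+1) (max 0 (depth-1)) in_sq in_dq
      else if depth == 0 then i :: spotsRec s fuel (i+1) depth in_sq in_dq
      else spotsRec s fuel (i+1) depth in_sq in_dq

theorem spotsRec_ge (s : List Char) :
    ∀ fuel i (d : Int) (sq dq : Bool) j, j ∈ spotsRec s fuel i d sq dq → i ≤ j := by
  intro fuel
  induction fuel with
  | zero => intro i d sq dq j hj; simp [spotsRec] at hj
  | succ fuel ih =>
    intro i d sq dq j hj
    rw [spotsRec] at hj
    cases hs : s[i]? with
    | none => rw [hs] at hj; simp at hj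
    | some ch =>
      rw [hs] at hj
      simp only at hj
      split_ifs at hj
      all_goals first
        | (have := ih _ _ _ _ _ hj; omega)
        | (rcases List.mem_cons.mp hj with h | h
           · omega
           · have := ih _ _ _ _ _ h; omega)

theorem spotsRec_sorted (s : List Char) :
    ∀ fuel i (d : Int) (sq dq : Bool), (spotsRec s fuel i d sq dq).Pairwise (· ≤ ·) := by
  intro fuel
  induction fuel with
  | zero => intro i d sq dq; simp [spotsRec]
  | succ fuel ih =>
    intro i d sq dq
    rw [spotsRec]
    cases hs : s[i]? with
    | none => simp
    | some ch =>
      simp only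
      split_ifs
      all_goals first
        | exact ih _ _ _ _
        | (refine List.pairwise_cons.mpr ⟨fun j hj => ?_, ih _ _ _ _⟩
           have := spotsRec_ge s fuel (i+1) _ _ _ j hj; omega)

/-- the foldl of B's step over `s.drop i` computes `spotsRec` (fuel = remaining length). -/
theorem foldl_step_eq_spotsRec (s : List Char) :
    ∀ fuel i (d : Int) (sq dq : Bool) (acc : List Nat), fuel = s.length - i →
    ((s.drop i).foldl pvSpotsStep (i, d, sq, dq, acc)).2.2.2.2 = acc ++ spotsRec s fuel i d sq dq := by
  intro fuel
  induction fuel with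
  | zero =>
    intro i d sq dq acc hf
    have hle : s.length ≤ i := by omega
    rw [List.drop_eq_nil_of_le hle]
    simp [spotsRec]
  | succ fuel ih =>
    intro i d sq dq acc hf
    have hi : i < s.length := by omega
    have hdrop : s.drop i = s[i] :: s.drop (i+1) := List.drop_eq_getElem_cons hi
    have hget : s[i]? = some s[i] := List.getElem?_eq_getElem hi
    have hf' : fuel = s.length - (i+1) := by omega
    rw [hdrop, List.foldl_cons, spotsRec, hget]
    simp only [pvSpotsStep]
    split_ifs with h1 h2 h3 h4 h5 h6
    · exact ih (i+1) d (!sq) dq acc hf'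
    · exact ih (i+1) d sq (!dq) acc hf'
    · exact ih (i+1) d sq dq acc hf'
    · exact ih (i+1) (d+1) sq dq acc hf'
    · exact ih (i+1) (max 0 (d-1)) sq dq acc hf'
    · rw [ih (i+1) d sq dq (acc ++ [i]) hf']
      simp
    · exact ih (i+1) d sq dq acc hf'

theorem pvSpots_eq_spotsRec (s : List Char) (j : Nat) :
    pvSpots s j = spotsRec s (s.length - j) j 0 false false := by
  unfold pvSpots
  rw [foldl_step_eq_spotsRec s (s.length - j) j 0 false false [] rfl]
  simp

/-- A's fused scan equals find? of the keyword predicate over the spot list (same fuel). -/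
theorem pvFindAGo_eq_find? (s sl key : List Char) :
    ∀ fuel i (d : Int) (sq dq : Bool),
    pvFindAGo s sl key fuel i d sq dq
      = (spotsRec s fuel i d sq dq).find? (fun j => key.isPrefixOf (sl.drop j)) := by
  intro fuel
  induction fuel with
  | zero => intro i d sq dq; simp [pvFindAGo, spotsRec]
  | succ fuel ih =>
    intro i d sq dq
    rw [pvFindAGo, spotsRec]
    cases hs : s[i]? with
    | none => simp
    | some ch =>
      simp only
      by_cases h1 : (ch == '\'' && !dq) = true
      · rw [if_pos h1, if_pos h1, ih]
      · rw [if_neg h1, if_neg h1]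
        by_cases h2 : (ch == '"' && !sq) = true
        · rw [if_pos h2, if_pos h2, ih]
        · rw [if_neg h2, if_neg h2]
          by_cases h3 : (!sq && !dq) = true
          · have h3' : ¬ (sq || dq) = true := by
              cases sq <;> cases dq <;> simp_all
            rw [if_pos h3, if_neg h3']
            by_cases h4 : (ch == '(') = true
            · rw [if_pos h4, if_pos h4, ih]
            · rw [if_neg h4, if_neg h4]
              by_cases h5 : (ch == ')') = true
              · rw [if_pos h5, if_pos h5, ih]
              · rw [if_neg h5, if_neg h5]
                by_cases hd : (d == 0) = true
                · rw [if_pos hd]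
                  by_cases hk : key.isPrefixOf (sl.drop i) = true
                  · rw [if_pos (show (d == 0 && key.isPrefixOf (sl.drop i)) = true by
                        simp [hd, hk]),
                        List.find?_cons_of_pos (p := fun j => key.isPrefixOf (sl.drop j))
                          (a := i) hk]
                  · rw [if_neg (show ¬ (d == 0 && key.isPrefixOf (sl.drop i)) = true by
                        simp [hk]),
                        List.find?_cons_of_neg (p := fun j => key.isPrefixOf (sl.drop j))
                          (a := i) hk, ih]
                · rw [if_neg (show ¬ (d == 0 && key.isPrefixOf (sl.drop i)) = true by
                      simp only [Bool.and_eq_true]; exact fun h => hd h.1),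
                      if_neg hd, ih]
          · have h3' : (sq || dq) = true := by
              cases sq <;> cases dq <;> simp_all
            rw [if_neg h3, if_pos h3', ih]

/-- option-min: combines the per-keyword search results the way Python's `min` of
the collected positions does. -/
def pvMinOpt : Option Nat → Option Nat → Option Nat
  | none, b => b
  | some x, none => some x
  | some x, some y => some (min x y)

theorem foldr_pvMinOpt_none {α : Type} (keys : List α) (g : α → Option Nat)
    (h : ∀ k ∈ keys, g k = none) :
    keys.foldr (fun k acc => pvMinOpt (g k) acc) none = none := by
  induction keys with
  | nil => rfl
  | cons k ks ih =>
    simp only [List.foldr]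
    rw [h k (by simp), ih (fun k hk => h k (by simp [hk]))]
    rfl

theorem foldr_pvMinOpt_congr {α : Type} (keys : List α) (g g' : α → Option Nat)
    (h : ∀ k ∈ keys, g k = g' k) :
    keys.foldr (fun k acc => pvMinOpt (g k) acc) none
      = keys.foldr (fun k acc => pvMinOpt (g' k) acc) none := by
  induction keys with
  | nil => rfl
  | cons k ks ih =>
    simp only [List.foldr]
    rw [h k (by simp), ih (fun k hk => h k (by simp [hk]))]

theorem foldr_pvMinOpt_ge {α : Type} (keys : List α) (g : α → Option Nat) (i : Nat)
    (hg : ∀ k ∈ keys, ∀ j, g k = some j → i ≤ j) :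
    ∀ j, keys.foldr (fun k acc => pvMinOpt (g k) acc) none = some j → i ≤ j := by
  induction keys with
  | nil => intro j h; simp at h
  | cons k ks ih =>
    intro j h
    simp only [List.foldr] at h
    have ihk := ih (fun k hk => hg k (by simp [hk]))
    cases hgk : g k with
    | none =>
      rw [hgk] at h; exact ihk j h
    | some x =>
      rw [hgk] at h
      cases hr : ks.foldr (fun k acc => pvMinOpt (g k) acc) none with
      | none => rw [hr] at h; simp [pvMinOpt] at h; subst h; exact hg k (by simp) x hgk
      | some y =>
        rw [hr] at h; simp [pvMinOpt] at h; subst h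
        have h1 := hg k (by simp) x hgk
        have h2 := ihk y hr
        omega

theorem foldr_pvMinOpt_first {α : Type} (keys : List α) (p : α → Bool) (g : α → Option Nat) (i : Nat)
    (hany : keys.any p = true)
    (hmatch : ∀ k ∈ keys, p k = true → g k = some i)
    (hge : ∀ k ∈ keys, ∀ j, g k = some j → i ≤ j) :
    keys.foldr (fun k acc => pvMinOpt (g k) acc) none = some i := by
  induction keys with
  | nil => simp at hany
  | cons k ks ih =>
    simp only [List.foldr]
    by_cases hk : p k = true
    · rw [hmatch k (by simp) hk]
      cases hr : ks.foldr (fun k acc => pvMinOpt (g k) acc) none with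
      | none => rfl
      | some y =>
        have := foldr_pvMinOpt_ge ks g i (fun k hk => hge k (by simp [hk])) y hr
        simp [pvMinOpt]; omega
    · have hany' : ks.any p = true := by
        simp only [List.any_cons] at hany
        cases hpk : p k with
        | true => exact absurd hpk hk
        | false => simpa [hpk] using hany
      rw [ih hany' (fun k hk hp => hmatch k (by simp [hk]) hp) (fun k hk => hge k (by simp [hk]))]
      cases hgk : g k with
      | none => rfl
      | some x =>
        have := hge k (by simp) x hgk
        simp [pvMinOpt]; omega

/-- on a sorted (≤) list, the pvMinOpt-fold of the per-keyword first matches is the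
first position matching any keyword. -/
theorem foldr_minopt_find {α : Type} (keys : List α) (p : α → Nat → Bool) :
    ∀ (l : List Nat), l.Pairwise (· ≤ ·) →
    keys.foldr (fun k acc => pvMinOpt (l.find? (p k)) acc) none
      = l.find? (fun j => keys.any (fun k => p k j)) := by
  intro l
  induction l with
  | nil =>
    intro _
    simp only [List.find?_nil]
    exact foldr_pvMinOpt_none keys _ (fun k _ => rfl)
  | cons a t ih =>
    intro hp
    have ha : ∀ j ∈ t, a ≤ j := (List.pairwise_cons.mp hp).1
    have hpt := (List.pairwise_cons.mp hp).2
    by_cases hAny : keys.any (fun k => p k a) = true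
    · rw [List.find?_cons_of_pos (by simpa using hAny)]
      refine foldr_pvMinOpt_first keys (fun k => p k a) _ a hAny ?_ ?_
      · intro k _ hk; exact List.find?_cons_of_pos hk
      · intro k _ j hj
        by_cases hk : p k a = true
        · rw [List.find?_cons_of_pos hk] at hj
          simp at hj; omega
        · rw [List.find?_cons_of_neg (by simpa using hk)] at hj
          exact ha j (List.mem_of_find?_eq_some hj)
    · have hAll : ∀ k ∈ keys, p k a = false := by
        intro k hk
        by_contra hc
        exact hAny (List.any_eq_true.mpr ⟨k, hk, by simpa using hc⟩)
      rw [List.find?_cons_of_neg (by simpa using hAny)]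
      rw [foldr_pvMinOpt_congr keys _ (fun k => t.find? (p k)) (fun k hk => by
        rw [List.find?_cons_of_neg (by simp [hAll k hk])])]
      exact ih hpt

theorem foldl_append_filterMap {α : Type} (l : List α) (g : α → Option Nat) (acc : List Nat) :
    l.foldl (fun acc ek => match g ek with | some p => acc ++ [p] | none => acc) acc
      = acc ++ l.filterMap g := by
  induction l generalizing acc with
  | nil => simp
  | cons k ks ih =>
    simp only [List.foldl, List.filterMap]
    cases g k <;> simp [ih]

theorem foldl_min_min (t : List Nat) : ∀ x y, t.foldl min (min x y) = min x (t.foldl min y) := by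
  induction t with
  | nil => intro x y; rfl
  | cons z t ih =>
    intro x y
    simp only [List.foldl]
    rw [min_assoc, ih]

theorem min?_id_pvMinOpt (x : Nat) (l : List Nat) :
    pvMinOpt (some x) (PySem.List.min? l (fun y => y)) = some (l.foldl min x) := by
  cases l with
  | nil => rfl
  | cons y t =>
    rw [PySem.List.min?_id_cons]
    simp only [pvMinOpt, List.foldl]
    rw [foldl_min_min]

theorem min?_eq_foldr {α : Type} (keys : List α) (g : α → Option Nat) :
    PySem.List.min? (keys.filterMap g) (fun x => x)
      = keys.foldr (fun k acc => pvMinOpt (g k) acc) none := by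
  induction keys with
  | nil => rfl
  | cons k ks ih =>
    simp only [List.filterMap, List.foldr]
    cases hgk : g k with
    | none => simpa using ih
    | some x =>
      simp only
      rw [PySem.List.min?_id_cons, ← ih, min?_id_pvMinOpt]

/-- A's end-keyword collection (per-keyword rescans, then min) equals the first
any-keyword match on the spot list. -/
theorem final_min (s sl : List Char) (ks : List String) (bs : Nat) :
    PySem.List.min? (ks.foldl (fun acc ek =>
        match pvFindAGo s sl (PySem.Chars.lower ek.toList) (s.length - bs) bs 0 false false with
        | some p => acc ++ [p] | none => acc) []) (fun x => x)
      = (spotsRec s (s.length - bs) bs 0 false false).find?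
          (fun j => (ks.map (fun k => PySem.Chars.lower k.toList)).any
            (fun k => k.isPrefixOf (sl.drop j))) := by
  rw [foldl_append_filterMap _ _ [], List.nil_append, min?_eq_foldr]
  rw [foldr_pvMinOpt_congr ks _
    (fun ek => (spotsRec s (s.length - bs) bs 0 false false).find?
      (fun j => (PySem.Chars.lower ek.toList).isPrefixOf (sl.drop j)))
    (fun ek _ => pvFindAGo_eq_find? s sl (PySem.Chars.lower ek.toList) (s.length - bs) bs 0 false false)]
  exact (foldr_minopt_find ks
      (fun ek j => (PySem.Chars.lower ek.toList).isPrefixOf (sl.drop j))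
      (spotsRec s (s.length - bs) bs 0 false false)
      (spotsRec_sorted s (s.length - bs) bs 0 false false)).trans
    (by simp only [List.any_map, Function.comp_def])

-- ===== VERDICT (by name: the statement is the Claim_ definition above) =====
theorem extract_clause_py_spec : Claim_equal_extract_clause_py := by
  intro sql start_kw end_kws _
  unfold Spec_extract_clause_py extract_clause_py extract_clause_py_alt
  simp only [pvSpots_eq_spotsRec, pvFindA]
  rw [← pvFindAGo_eq_find?]
  cases pvFindAGo sql.toList (PySem.Chars.lower sql.toList)
      (PySem.Chars.lower start_kw.toList) (sql.toList.length - 0) 0 0 false false with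
  | none => rfl
  | some start =>
    simp only
    rw [final_min sql.toList (PySem.Chars.lower sql.toList) end_kws
        (start + start_kw.toList.length)]
    cases (spotsRec sql.toList (sql.toList.length - (start + start_kw.toList.length))
        (start + start_kw.toList.length) 0 false false).find?
        (fun j => (end_kws.map (fun k => PySem.Chars.lower k.toList)).any
          (fun k => k.isPrefixOf ((PySem.Chars.lower sql.toList).drop j))) with
    | none => rfl
    | some e => rfl
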